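-- pv_equiv track=rewrite | github.com/Choisungbum/ai-agent-prototype | RAG/app/preprocessing/loader/pdf/lib_pymupdf.py | table_to_sentence
-- ===== SOURCE A (Python) =====
-- def normalize_table_rows(table):
--     """병합 셀로 인한 빈칸 보정"""
--     rows = [[(c or "").strip() for c in r] for r in table]
--     for i in range(1, len(rows)):
--         for j in range(len(rows[i])):
--             if rows[i][j] == "":
--                 rows[i][j] = rows[i-1][j]
--     return rows
--
-- def table_to_sentence(table):
--     """테이블 1개 → 문장 1덩어리"""
--     if not table or len(table) < 2:
--         return ""
--
--     table = normalize_table_rows(table)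
--     header = table[0]
--     body = table[1:]
--
--     # 2열 key-value 테이블
--     if len(header) == 2:
--         parts = []
--         for r in body:
--             k, v = r[0].strip(), r[1].strip()
--             if k and v:
--                 parts.append(f"{k}는 {v}")
--         return " / ".join(parts)
--
--     # 3열 이상
--     rows = []
--     for r in body:
--         pairs = []
--         for h, v in zip(header, r):
--             if h and v:
--                 pairs.append(f"{h}={v}")
--         if pairs:
--             rows.append(", ".join(pairs))
--     return " | ".join(rows)
-- ===== SOURCE B (Python) =====
-- def table_to_sentence(table):
--     if not table or len(table) < 2:
--         return ""
--     header = [(c or "").strip() for c in table[0]]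
--     kv = len(header) == 2
--     carry = list(header)
--     parts = []
--     for r in table[1:]:
--         resolved = []
--         for j, c in enumerate(r):
--             c = (c or "").strip()
--             if not c:
--                 c = carry[j]
--             resolved.append(c)
--         carry = resolved
--         if kv:
--             if resolved[0] and resolved[1]:
--                 parts.append(f"{resolved[0]}는 {resolved[1]}")
--         else:
--             pairs = [f"{h}={v}" for h, v in zip(header, resolved) if h and v]
--             if pairs:
--                 parts.append(", ".join(pairs))
--     return (" / " if kv else " | ").join(parts)
-- ===== Notes on version B (the rewrite author's own statement) =====
-- stated objective: simpler
-- what changed: B fuses A's two phases (build a fully fill-down-normalized matrix, then format it) into one pass over the body rows that keeps a per-column carry (the previous resolved row, seeded from the stripped header) and emits each row's formatted part immediately.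
import Mathlib
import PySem

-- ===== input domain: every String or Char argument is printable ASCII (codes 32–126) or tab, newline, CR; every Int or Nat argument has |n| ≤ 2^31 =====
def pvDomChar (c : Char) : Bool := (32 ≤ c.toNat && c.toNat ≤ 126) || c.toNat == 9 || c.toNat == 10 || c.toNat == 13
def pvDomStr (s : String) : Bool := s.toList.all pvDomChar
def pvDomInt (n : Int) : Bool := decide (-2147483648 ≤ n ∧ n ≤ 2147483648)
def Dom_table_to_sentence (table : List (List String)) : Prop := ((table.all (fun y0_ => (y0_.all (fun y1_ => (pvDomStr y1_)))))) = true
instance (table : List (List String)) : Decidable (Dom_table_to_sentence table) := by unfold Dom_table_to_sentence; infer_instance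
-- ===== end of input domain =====

-- B fuses A's two passes (build a fully normalized matrix, then format it) into one pass over the
-- body rows that maintains a per-column carry (the previous resolved row) and emits each row's
-- formatted part immediately; objective: simpler single-pass decomposition, same cost.

-- ===== PORT A =====
-- rows = [[(c or "").strip() for c in r] for r in table]   (cells are str here, so (c or "") = c)
def pvStripRow (r : List String) : List String := r.map (fun c => PySem.Str.strip c)

-- inner loop 'for j in range(len(rows[i])): if rows[i][j] == "": rows[i][j] = rows[i-1][j]';
-- rows[i-1][j] is PySem.List.pyGetD with default "" — exact on Pre_ (where Python does not raise IndexError)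
def pvFillRow (prev row : List String) : List String :=
  (PySem.List.enumerate row).map (fun jc => if jc.2 = "" then PySem.List.pyGetD prev jc.1 "" else jc.2)

-- outer loop 'for i in range(1, len(rows))': each row is filled from the already-filled previous row
def pvNormLoop (prev : List String) : List (List String) → List (List String)
  | [] => []
  | r :: rs => pvFillRow prev r :: pvNormLoop (pvFillRow prev r) rs

def normalize_table_rows (table : List (List String)) : List (List String) :=
  match table.map pvStripRow with
  | [] => []
  | h :: t => h :: pvNormLoop h t

def table_to_sentence (table : List (List String)) : String :=
  if table.length < 2 then ""
  else
    match normalize_table_rows table with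
    | [] => ""   -- unreachable: table is nonempty here
    | header :: body =>
      if header.length = 2 then
        let parts := body.foldl (fun acc r =>
          let k := PySem.Str.strip (PySem.List.pyGetD r 0 "")
          let v := PySem.Str.strip (PySem.List.pyGetD r 1 "")
          if k ≠ "" ∧ v ≠ "" then acc ++ [k ++ "는 " ++ v] else acc) []
        PySem.Str.join " / " parts
      else
        let rows := body.foldl (fun acc r =>
          let pairs := (header.zip r).foldl (fun p hv =>
            if hv.1 ≠ "" ∧ hv.2 ≠ "" then p ++ [hv.1 ++ "=" ++ hv.2] else p) []
          if pairs ≠ [] then acc ++ [PySem.Str.join ", " pairs] else acc) []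
        PySem.Str.join " | " rows

-- ===== PORT B =====
-- resolved = []; for j, c in enumerate(r): c = c.strip(); c = carry[j] if not c else c; resolved.append(c)
def pvResolveRow (carry r : List String) : List String :=
  (PySem.List.enumerate r).foldl (fun acc jc =>
    acc ++ [if PySem.Str.strip jc.2 = "" then PySem.List.pyGetD carry jc.1 ""
            else PySem.Str.strip jc.2]) []

-- one formatted part for a resolved row (the loop body's if kv: … else: … block)
def pvRowPart (kv : Bool) (header resolved : List String) : List String :=
  if kv then
    if PySem.List.pyGetD resolved 0 "" ≠ "" ∧ PySem.List.pyGetD resolved 1 "" ≠ "" then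
      [PySem.List.pyGetD resolved 0 "" ++ "는 " ++ PySem.List.pyGetD resolved 1 ""]
    else []
  else
    let pairs := ((header.zip resolved).filter
        (fun hv => decide (hv.1 ≠ "" ∧ hv.2 ≠ ""))).map (fun hv => hv.1 ++ "=" ++ hv.2)
    if pairs ≠ [] then [PySem.Str.join ", " pairs] else []

def table_to_sentence_alt (table : List (List String)) : String :=
  if table.length < 2 then ""
  else
    let header := (table.headD []).map (fun c => PySem.Str.strip c)
    let kv := header.length == 2
    let st := (table.drop 1).foldl
      (fun (st : List String × List String) r =>
        (pvResolveRow st.1 r, st.2 ++ pvRowPart kv header (pvResolveRow st.1 r)))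
      (header, [])
    PySem.Str.join (if kv then " / " else " | ") st.2

-- ===== PRECONDITION & SPEC =====
-- Pre_ excludes exactly the inputs where the Python A raises IndexError: a blank cell whose column
-- does not exist in the previous row (fill-down reads rows[i-1][j]), and, in the 2-column branch,
-- a body row with fewer than 2 cells (it reads r[1]).
def Pre_table_to_sentence (table : List (List String)) : Prop :=
  table.length < 2 ∨
  ((∀ i, 1 ≤ i → i < table.length → ∀ j < (table.getD i []).length,
      PySem.Str.strip ((table.getD i []).getD j "") = "" → j < (table.getD (i - 1) []).length) ∧
   ((table.headD []).length = 2 → ∀ r ∈ table.drop 1, 2 ≤ r.length))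
instance (table : List (List String)) : Decidable (Pre_table_to_sentence table) := by
  unfold Pre_table_to_sentence; infer_instance
def pvWitness_table_to_sentence : List (List String) := [["name", "age"], ["kim", "3"], ["", "4"]]

def Spec_table_to_sentence (table : List (List String)) (out : String) : Prop := out = table_to_sentence_alt table
instance (table : List (List String)) (out : String) : Decidable (Spec_table_to_sentence table out) := by unfold Spec_table_to_sentence; infer_instance

-- ===== CLAIM (what is proved, stated in full; the proofs are below) =====
def Claim_equal_table_to_sentence : Prop := ∀ (table : List (List String)), Dom_table_to_sentence table → Pre_table_to_sentence table → Spec_table_to_sentence table (table_to_sentence table)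

-- ===== LEMMAS AND PROOFS =====

-- every string produced by strip is a fixed point of strip (strip is idempotent)
theorem pv_head_dropWhile_false (p : Char → Bool) : ∀ (l : List Char) (x : Char) (xs : List Char), List.dropWhile p l = x :: xs → p x = false := by
  intro l
  induction l with
  | nil => intro x xs h; simp [List.dropWhile] at h
  | cons a t ih =>
    intro x xs h
    rw [List.dropWhile_cons] at h
    by_cases hp : p a
    · simp [hp] at h; exact ih x xs h
    · simp [hp] at h; simpa [← h.1] using hp

theorem pv_dropWhile_prefix_fix (p : Char → Bool) (l xs : List Char) (h : xs <+: List.dropWhile p l) : List.dropWhile p xs = xs := by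
  cases xs with
  | nil => simp
  | cons x t =>
    have hx : p x = false := by
      obtain ⟨r, hr⟩ := h
      exact pv_head_dropWhile_false p l x (t ++ r) hr.symm
    rw [List.dropWhile_cons, hx]
    simp

theorem pv_chars_strip_strip (l : List Char) : PySem.Chars.strip (PySem.Chars.strip l) = PySem.Chars.strip l := by
  simp only [PySem.Chars.strip, PySem.Chars.rstrip, PySem.Chars.lstrip]
  have step1 : List.dropWhile PySem.Chars.isspace
      (List.dropWhile PySem.Chars.isspace (List.dropWhile PySem.Chars.isspace l).reverse).reverse
      = (List.dropWhile PySem.Chars.isspace (List.dropWhile PySem.Chars.isspace l).reverse).reverse := by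
    apply pv_dropWhile_prefix_fix PySem.Chars.isspace l
    have hs : List.dropWhile PySem.Chars.isspace (List.dropWhile PySem.Chars.isspace l).reverse
        <:+ (List.dropWhile PySem.Chars.isspace l).reverse := List.dropWhile_suffix _
    have := List.IsSuffix.reverse hs
    simpa using this
  rw [step1, List.reverse_reverse, List.dropWhile_idempotent]

theorem pv_strip_strip (s : String) : PySem.Str.strip (PySem.Str.strip s) = PySem.Str.strip s := by
  apply String.toList_inj.mp
  simp only [PySem.Str.toList_strip]
  exact pv_chars_strip_strip _

-- lists whose members are all strip-fixed (every resolved row is such a list)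
def PVStripped (xs : List String) : Prop := ∀ x ∈ xs, PySem.Str.strip x = x

theorem pv_strip_pyGetD (xs : List String) (hs : PVStripped xs) (i : Int) :
    PySem.Str.strip (PySem.List.pyGetD xs i "") = PySem.List.pyGetD xs i "" := by
  unfold PySem.List.pyGetD
  cases h : PySem.List.pyGet? xs i with
  | none => rfl
  | some v => simpa using hs v (PySem.List.mem_of_pyGet?_eq_some xs h)

theorem pv_enumerate_map (f : String → String) (r : List String) : ∀ s : Int,
    PySem.List.enumerate (r.map f) s = (PySem.List.enumerate r s).map (fun p => (p.1, f p.2)) := by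
  induction r with
  | nil => intro s; simp [PySem.List.enumerate_nil]
  | cons a t ih => intro s; simp [PySem.List.enumerate_cons, ih]

-- B's fused resolution step computes A's fill of the pre-stripped row
theorem pv_resolve_eq (carry r : List String) :
    pvResolveRow carry r = pvFillRow carry (pvStripRow r) := by
  unfold pvResolveRow pvFillRow pvStripRow
  rw [PySem.List.foldl_append_singleton_eq_map, pv_enumerate_map, List.map_map]
  simp

theorem pv_mem_of_mem_enumerate {r : List String} {p : Int × String} {s : Int}
    (h : p ∈ PySem.List.enumerate r s) : p.2 ∈ r := by
  rw [PySem.List.mem_enumerate_iff] at h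
  obtain ⟨k, hk, rfl⟩ := h
  exact List.getElem_mem hk

theorem pv_stripped_striprow (r : List String) : PVStripped (pvStripRow r) := by
  intro x hx
  unfold pvStripRow at hx
  obtain ⟨c, _, rfl⟩ := List.mem_map.mp hx
  exact pv_strip_strip c

theorem pv_stripped_fill (prev row : List String) (hp : PVStripped prev) (hr : PVStripped row) :
    PVStripped (pvFillRow prev row) := by
  intro x hx
  unfold pvFillRow at hx
  obtain ⟨jc, hjc, rfl⟩ := List.mem_map.mp hx
  split
  · exact pv_strip_pyGetD prev hp _
  · exact hr jc.2 (pv_mem_of_mem_enumerate hjc)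

theorem pv_stripped_normloop : ∀ (body : List (List String)) (carry : List String),
    PVStripped carry → (∀ r ∈ body, PVStripped r) →
    ∀ r ∈ pvNormLoop carry body, PVStripped r := by
  intro body
  induction body with
  | nil => intro carry _ _ r hr; simp [pvNormLoop] at hr
  | cons b bs ih =>
    intro carry hc hb r hr
    simp only [pvNormLoop, List.mem_cons] at hr
    have hfill : PVStripped (pvFillRow carry b) :=
      pv_stripped_fill carry b hc (hb b (by simp))
    rcases hr with rfl | hr
    · exact hfill
    · exact ih (pvFillRow carry b) hfill (fun r hr => hb r (by simp [hr])) r hr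

-- B's single fold equals A's normalize-then-fold, for any per-row part function g
theorem pv_fold_eq (g : List String → List String) :
    ∀ (body : List (List String)) (carry acc : List String),
    (body.foldl (fun (st : List String × List String) r =>
        (pvResolveRow st.1 r, st.2 ++ g (pvResolveRow st.1 r))) (carry, acc)).2
    = (pvNormLoop carry (body.map pvStripRow)).foldl (fun a r => a ++ g r) acc := by
  intro body
  induction body with
  | nil => intro carry acc; simp [pvNormLoop]
  | cons r rs ih =>
    intro carry acc
    simp only [List.foldl_cons, List.map_cons, pvNormLoop]
    rw [pv_resolve_eq carry r]
    exact ih (pvFillRow carry (pvStripRow r)) (acc ++ g (pvFillRow carry (pvStripRow r)))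

theorem pv_if_append (C : Prop) [Decidable C] (acc X : List String) :
    (if C then acc ++ X else acc) = acc ++ (if C then X else []) := by
  split_ifs <;> simp

-- A's 2-column loop body equals appending pvRowPart true, on strip-fixed rows
theorem pv_step_kv (header r : List String) (h : PVStripped r) (acc : List String) :
    (if PySem.Str.strip (PySem.List.pyGetD r 0 "") ≠ "" ∧ PySem.Str.strip (PySem.List.pyGetD r 1 "") ≠ "" then
        acc ++ [PySem.Str.strip (PySem.List.pyGetD r 0 "") ++ "는 " ++ PySem.Str.strip (PySem.List.pyGetD r 1 "")]
      else acc)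
    = acc ++ pvRowPart true header r := by
  rw [pv_strip_pyGetD r h 0, pv_strip_pyGetD r h 1]
  unfold pvRowPart
  by_cases hc : PySem.List.pyGetD r 0 "" ≠ "" ∧ PySem.List.pyGetD r 1 "" ≠ ""
  · simp [hc]
  · simp [hc]

-- A's 3+-column loop body equals appending pvRowPart false
theorem pv_step_wide (header r : List String) (acc : List String) :
    (if ((header.zip r).foldl (fun p hv =>
          if hv.1 ≠ "" ∧ hv.2 ≠ "" then p ++ [hv.1 ++ "=" ++ hv.2] else p) []) ≠ [] then
        acc ++ [PySem.Str.join ", " ((header.zip r).foldl (fun p hv =>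
          if hv.1 ≠ "" ∧ hv.2 ≠ "" then p ++ [hv.1 ++ "=" ++ hv.2] else p) [])]
      else acc)
    = acc ++ pvRowPart false header r := by
  rw [PySem.List.foldl_append_ite (p := fun hv : String × String => hv.1 ≠ "" ∧ hv.2 ≠ "")
      (f := fun hv : String × String => hv.1 ++ "=" ++ hv.2)]
  unfold pvRowPart
  simp only [List.nil_append, Bool.false_eq_true, if_false]
  exact pv_if_append _ _ _

-- ===== VERDICT (by name: the statement is the Claim_ definition above) =====
theorem table_to_sentence_spec : Claim_equal_table_to_sentence := by
  intro table _ _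
  unfold Spec_table_to_sentence table_to_sentence table_to_sentence_alt
  by_cases hlen : table.length < 2
  · simp [hlen]
  · obtain ⟨t0, t1, rest, rfl⟩ : ∃ t0 t1 rest, table = t0 :: t1 :: rest := by
      cases table with
      | nil => exact absurd (by simp) hlen
      | cons t0 r0 =>
        cases r0 with
        | nil => exact absurd (by simp) hlen
        | cons t1 rest => exact ⟨t0, t1, rest, rfl⟩
    simp only [if_neg hlen, normalize_table_rows, List.map_cons, List.headD_cons,
      List.drop_succ_cons, List.drop_zero]
    have hdr : (t0.map fun c => PySem.Str.strip c) = pvStripRow t0 := rfl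
    simp only [hdr]
    have hstripped : ∀ r ∈ pvNormLoop (pvStripRow t0) ((t1 :: rest).map pvStripRow), PVStripped r := by
      apply pv_stripped_normloop _ _ (pv_stripped_striprow t0)
      intro r hr
      obtain ⟨r0, _, rfl⟩ := List.mem_map.mp hr
      exact pv_stripped_striprow r0
    by_cases hkv : (pvStripRow t0).length = 2
    · have hb : ((pvStripRow t0).length == 2) = true := by simp [hkv]
      simp only [if_pos hkv, hb, if_true]
      rw [pv_fold_eq (pvRowPart true (pvStripRow t0)) (t1 :: rest) (pvStripRow t0) []]
      simp only [List.map_cons]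
      refine congrArg _ ?_
      rw [PySem.List.foldl_congr_mem' _ _ (fun a r => a ++ pvRowPart true (pvStripRow t0) r) []
          (fun r hr acc => pv_step_kv (pvStripRow t0) r
            (hstripped r (by simpa using hr)) acc)]
    · have hb : ((pvStripRow t0).length == 2) = false := by simp [hkv]
      simp only [if_neg hkv, hb, Bool.false_eq_true, if_false]
      rw [pv_fold_eq (pvRowPart false (pvStripRow t0)) (t1 :: rest) (pvStripRow t0) []]
      simp only [List.map_cons]
      refine congrArg _ ?_
      rw [PySem.List.foldl_congr_mem' _ _ (fun a r => a ++ pvRowPart false (pvStripRow t0) r) []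
          (fun r hr acc => pv_step_wide (pvStripRow t0) r acc)]
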